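-- pv_equiv track=rewrite | github.com/hanno79/AgentSmith | backend/dev_loop_task_derivation.py | should_use_task_derivation
-- ===== SOURCE A (Python) =====
-- def should_use_task_derivation(
--
--     feedback: str,
--     source: str,
--     iteration: int
-- ) -> bool:
--     """
--     Entscheidet ob Task-Ableitung sinnvoll ist.
--
--     Args:
--         feedback: Feedback-Text
--         source: Feedback-Quelle ("reviewer", "quality_gate", "security", "sandbox", "initial", "discovery")
--         iteration: Aktuelle Iteration
--
--     Returns:
--         True wenn Task-Ableitung aktiviert werden soll
--     """
--     # AENDERUNG 01.02.2026: Initial und Discovery immer verarbeiten (Phase 5)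
--     if source in ["initial", "discovery"]:
--         return len(feedback.strip()) >= 30
--
--     # Deaktiviert fuer erste Iteration (nur fuer non-initial Quellen)
--     if iteration < 1:
--         return False
--
--     # Minimale Feedback-Laenge
--     if len(feedback.strip()) < 50:
--         return False
--
--     # AENDERUNG 01.02.2026: Quellen-spezifische Indikatoren (Phase 9)
--     if source == "security":
--         security_indicators = [
--             "Vulnerability", "CVE-", "Schwachstelle", "Injection",
--             "XSS", "CSRF", "SQL", "Security", "kritisch", "high",
--             "medium", "low", "severity", "risk"
--         ]
--         indicator_count = sum(1 for ind in security_indicators if ind.lower() in feedback.lower())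
--         return indicator_count >= 1  # Ein Security-Issue reicht
--
--     if source == "sandbox":
--         sandbox_indicators = [
--             "Error:", "Exception:", "Traceback", "Failed",
--             "AssertionError", "TypeError", "ValueError",
--             "ImportError", "NameError", "SyntaxError",
--             "FAIL:", "ERROR:", "Sandbox-Fehler", "Test-Summary"
--         ]
--         indicator_count = sum(1 for ind in sandbox_indicators if ind in feedback)
--         return indicator_count >= 1  # Ein Sandbox-Fehler reicht
--
--     # Standard: Pruefen ob Feedback mehrere Issues enthaelt (reviewer, quality_gate)
--     issue_indicators = [
--         "\n-", "\n*", "\n1.", "\n2.",  # Listen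
--         "Fehler:", "Error:", "Warning:",  # Fehler-Keywords
--         "TODO:", "FIXME:", "BUG:",  # Marker
--         "Ursache:", "Loesung:", "Betroffene",  # Root Cause Format
--     ]
--
--     indicator_count = sum(1 for ind in issue_indicators if ind in feedback)
--
--     # Aktivieren wenn mehrere Indikatoren gefunden
--     return indicator_count >= 2
-- ===== SOURCE B (Python) =====
-- SECURITY_INDICATORS = [
--     "Vulnerability", "CVE-", "Schwachstelle", "Injection",
--     "XSS", "CSRF", "SQL", "Security", "kritisch", "high",
--     "medium", "low", "severity", "risk",
-- ]
--
-- SANDBOX_INDICATORS = [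
--     "Error:", "Exception:", "Traceback", "Failed",
--     "AssertionError", "TypeError", "ValueError",
--     "ImportError", "NameError", "SyntaxError",
--     "FAIL:", "ERROR:", "Sandbox-Fehler", "Test-Summary",
-- ]
--
-- ISSUE_INDICATORS = [
--     "\n-", "\n*", "\n1.", "\n2.",
--     "Fehler:", "Error:", "Warning:",
--     "TODO:", "FIXME:", "BUG:",
--     "Ursache:", "Loesung:", "Betroffene",
-- ]
--
--
-- def _need_hits(indicators, pred, needed):
--     # Recursive short-circuit search for the `needed`-th matching indicator:
--     # returns as soon as enough hits are found, never counts the rest.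
--     if needed == 0:
--         return True
--     if not indicators:
--         return False
--     head, *rest = indicators
--     return _need_hits(rest, pred, needed - 1 if pred(head) else needed)
--
--
-- def should_use_task_derivation(feedback: str, source: str, iteration: int) -> bool:
--     if source in ("initial", "discovery"):
--         return len(feedback.strip()) >= 30
--     if iteration < 1 or len(feedback.strip()) < 50:
--         return False
--     if source == "security":
--         low = feedback.lower()
--         return _need_hits(SECURITY_INDICATORS, lambda ind: ind.lower() in low, 1)
--     if source == "sandbox":
--         return _need_hits(SANDBOX_INDICATORS, lambda ind: ind in feedback, 1)
--     return _need_hits(ISSUE_INDICATORS, lambda ind: ind in feedback, 2)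
-- ===== Notes on version B (the rewrite author's own statement) =====
-- stated objective: alternative
-- what changed: A exhaustively counts every matching indicator and then compares the count to a threshold; B replaces the counting loop with a recursive short-circuit search (_need_hits) that decrements the number of still-needed hits and stops as soon as enough are found, with the three branches sharing that one helper through a predicate.
import Mathlib
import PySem

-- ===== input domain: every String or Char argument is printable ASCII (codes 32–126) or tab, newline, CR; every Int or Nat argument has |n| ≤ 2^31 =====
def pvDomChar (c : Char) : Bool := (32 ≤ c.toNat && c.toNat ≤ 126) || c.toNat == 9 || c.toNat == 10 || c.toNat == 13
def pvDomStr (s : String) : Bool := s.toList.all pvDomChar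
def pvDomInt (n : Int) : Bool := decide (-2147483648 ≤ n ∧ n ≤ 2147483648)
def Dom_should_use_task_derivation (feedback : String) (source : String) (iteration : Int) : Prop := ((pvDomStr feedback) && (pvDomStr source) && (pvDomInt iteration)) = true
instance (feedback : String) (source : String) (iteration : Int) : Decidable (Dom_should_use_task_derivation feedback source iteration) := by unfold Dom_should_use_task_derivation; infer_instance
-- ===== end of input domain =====

-- B replaces A's exhaustive indicator counting with one recursive short-circuit search for the
-- needed-th hit, shared by all three sources through a predicate (alternative decomposition).

-- ===== PORT A =====
def should_use_task_derivation (feedback : String) (source : String) (iteration : Int) : Bool :=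
  if source == "initial" || source == "discovery" then
    PySem.Str.len (PySem.Str.strip feedback) ≥ 30
  else if iteration < 1 then
    false
  else if PySem.Str.len (PySem.Str.strip feedback) < 50 then
    false
  else if source == "security" then
    let security_indicators : List String :=
      ["Vulnerability", "CVE-", "Schwachstelle", "Injection",
       "XSS", "CSRF", "SQL", "Security", "kritisch", "high",
       "medium", "low", "severity", "risk"]
    let indicator_count : Int := security_indicators.foldl
      (fun acc ind => if PySem.Str.isIn (PySem.Str.lower ind) (PySem.Str.lower feedback) then acc + 1 else acc) 0
    indicator_count ≥ 1
  else if source == "sandbox" then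
    let sandbox_indicators : List String :=
      ["Error:", "Exception:", "Traceback", "Failed",
       "AssertionError", "TypeError", "ValueError",
       "ImportError", "NameError", "SyntaxError",
       "FAIL:", "ERROR:", "Sandbox-Fehler", "Test-Summary"]
    let indicator_count : Int := sandbox_indicators.foldl
      (fun acc ind => if PySem.Str.isIn ind feedback then acc + 1 else acc) 0
    indicator_count ≥ 1
  else
    let issue_indicators : List String :=
      ["\n-", "\n*", "\n1.", "\n2.",
       "Fehler:", "Error:", "Warning:",
       "TODO:", "FIXME:", "BUG:",
       "Ursache:", "Loesung:", "Betroffene"]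
    let indicator_count : Int := issue_indicators.foldl
      (fun acc ind => if PySem.Str.isIn ind feedback then acc + 1 else acc) 0
    indicator_count ≥ 2

-- ===== PORT B =====
def pvSecurityIndicators : List String :=
  ["Vulnerability", "CVE-", "Schwachstelle", "Injection",
   "XSS", "CSRF", "SQL", "Security", "kritisch", "high",
   "medium", "low", "severity", "risk"]

def pvSandboxIndicators : List String :=
  ["Error:", "Exception:", "Traceback", "Failed",
   "AssertionError", "TypeError", "ValueError",
   "ImportError", "NameError", "SyntaxError",
   "FAIL:", "ERROR:", "Sandbox-Fehler", "Test-Summary"]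

def pvIssueIndicators : List String :=
  ["\n-", "\n*", "\n1.", "\n2.",
   "Fehler:", "Error:", "Warning:",
   "TODO:", "FIXME:", "BUG:",
   "Ursache:", "Loesung:", "Betroffene"]

-- Source B's _need_hits: recursive short-circuit search for the `needed`-th matching indicator
def pvNeedHits (pred : String → Bool) : List String → Nat → Bool
  | _, 0 => true
  | [], _ + 1 => false
  | head :: rest, n + 1 => pvNeedHits pred rest (if pred head then n else n + 1)

def should_use_task_derivation_alt (feedback : String) (source : String) (iteration : Int) : Bool :=
  if source == "initial" || source == "discovery" then
    PySem.Str.len (PySem.Str.strip feedback) ≥ 30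
  else if iteration < 1 || PySem.Str.len (PySem.Str.strip feedback) < 50 then
    false
  else if source == "security" then
    let low := PySem.Str.lower feedback
    pvNeedHits (fun ind => PySem.Str.isIn (PySem.Str.lower ind) low) pvSecurityIndicators 1
  else if source == "sandbox" then
    pvNeedHits (fun ind => PySem.Str.isIn ind feedback) pvSandboxIndicators 1
  else
    pvNeedHits (fun ind => PySem.Str.isIn ind feedback) pvIssueIndicators 2

-- ===== PRECONDITION & SPEC =====
def Spec_should_use_task_derivation (feedback : String) (source : String) (iteration : Int) (out : Bool) : Prop := out = should_use_task_derivation_alt feedback source iteration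
instance (feedback : String) (source : String) (iteration : Int) (out : Bool) : Decidable (Spec_should_use_task_derivation feedback source iteration out) := by unfold Spec_should_use_task_derivation; infer_instance

-- ===== CLAIM (what is proved, stated in full; the proofs are below) =====
def Claim_equal_should_use_task_derivation : Prop := ∀ (feedback : String) (source : String) (iteration : Int), Dom_should_use_task_derivation feedback source iteration → Spec_should_use_task_derivation feedback source iteration (should_use_task_derivation feedback source iteration)

-- ===== LEMMAS AND PROOFS =====

-- the short-circuit search finds the k-th hit iff at least k indicators match
theorem pvNeedHits_eq_countP (pred : String → Bool) (l : List String) (k : Nat) :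
    pvNeedHits pred l k = decide (k ≤ l.countP pred) := by
  induction l generalizing k with
  | nil => cases k <;> simp [pvNeedHits]
  | cons h t ih =>
    cases k with
    | zero => simp [pvNeedHits]
    | succ n =>
      by_cases hp : pred h <;> simp [pvNeedHits, hp, ih]

-- A's exhaustive count compared with a threshold equals B's short-circuit search
theorem count_ge_iff_needHits (pred : String → Bool) (l : List String) (k : Nat) :
    decide ((l.foldl (fun acc ind => if pred ind then acc + 1 else acc) (0 : Int)) ≥ (k : Int))
      = pvNeedHits pred l k := by
  rw [pvNeedHits_eq_countP, PySem.List.foldl_if_add_one, decide_eq_decide]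
  omega

-- ===== VERDICT (by name: the statement is the Claim_ definition above) =====
theorem should_use_task_derivation_spec : Claim_equal_should_use_task_derivation := by
  intro feedback source iteration _
  unfold Spec_should_use_task_derivation should_use_task_derivation should_use_task_derivation_alt
  by_cases h0 : (source == "initial" || source == "discovery") = true
  · simp [h0]
  · simp only [h0, Bool.false_eq_true, if_false]
    by_cases h1 : iteration < 1
    · simp [h1]
    · by_cases h2 : PySem.Str.len (PySem.Str.strip feedback) < 50
      · rw [if_neg h1, if_pos h2, if_pos (by simp only [Bool.or_eq_true, decide_eq_true_eq]; exact Or.inr h2 : (decide (iteration < 1) || decide (PySem.Str.len (PySem.Str.strip feedback) < 50)) = true)]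
      · rw [if_neg h1, if_neg h2, if_neg (by simp only [Bool.or_eq_true, decide_eq_true_eq]; exact fun h => h.elim h1 h2 : ¬ (decide (iteration < 1) || decide (PySem.Str.len (PySem.Str.strip feedback) < 50)) = true)]
        by_cases hs : (source == "security") = true
        · simp only [hs, if_true]
          exact count_ge_iff_needHits _ pvSecurityIndicators 1
        · simp only [hs, Bool.false_eq_true, if_false]
          by_cases hb : (source == "sandbox") = true
          · simp only [hb, if_true]
            exact count_ge_iff_needHits _ pvSandboxIndicators 1
          · simp only [hb, Bool.false_eq_true, if_false]
            exact count_ge_iff_needHits _ pvIssueIndicators 2
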